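-- pv_equiv track=rewrite | github.com/leeyang1991/lytools | lytools/_lytools.py | __left_consecutive_index
-- ===== SOURCE A (Python) =====
-- def __left_consecutive_index(values_list,invalid_value):
--     left_consecutive_non_valid_index = []
--     for i in range(len(values_list)):
--         if values_list[i] == invalid_value:
--             left_consecutive_non_valid_index.append(i)
--         else:
--             break
--     return left_consecutive_non_valid_index
-- ===== SOURCE B (Python) =====
-- def __left_consecutive_index(values_list, invalid_value):
--     n = len(values_list)
--     k = min((i for i, v in enumerate(values_list) if v != invalid_value), default=n)
--     return list(range(k))
-- ===== Notes on version B (the rewrite author's own statement) =====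
-- stated objective: alternative
-- what changed: B never walks the prefix with an early break: it scans the whole list once with enumerate, takes the minimum index whose value differs from invalid_value (defaulting to len), and returns list(range(...)) of that boundary.
import Mathlib
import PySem

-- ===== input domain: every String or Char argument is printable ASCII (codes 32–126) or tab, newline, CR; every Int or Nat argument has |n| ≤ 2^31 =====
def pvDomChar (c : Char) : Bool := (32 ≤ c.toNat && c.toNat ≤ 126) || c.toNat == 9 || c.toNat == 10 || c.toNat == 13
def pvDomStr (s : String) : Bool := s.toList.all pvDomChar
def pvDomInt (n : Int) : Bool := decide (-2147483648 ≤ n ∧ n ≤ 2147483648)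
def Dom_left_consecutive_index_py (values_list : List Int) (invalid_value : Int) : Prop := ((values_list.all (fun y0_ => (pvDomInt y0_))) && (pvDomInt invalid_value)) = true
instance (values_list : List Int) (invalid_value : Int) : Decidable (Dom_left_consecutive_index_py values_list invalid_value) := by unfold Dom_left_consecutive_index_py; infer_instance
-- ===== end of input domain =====

-- B scans the whole list once with enumerate, takes the minimum mismatch index
-- (default len) and returns range of it, instead of A's early-break prefix scan.

-- ===== PORT A =====
-- A scans by index with an early break, appending each index; ported as structural
-- recursion over the remaining list carrying the current index i.
def leftConsecGoA : List Int -> Int -> Int -> List Int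
  | [], _, _ => []
  | v :: rest, inv, i => if v == inv then i :: leftConsecGoA rest inv (i + 1) else []

def left_consecutive_index_py (values_list : List Int) (invalid_value : Int) : List Int :=
  leftConsecGoA values_list invalid_value 0

-- ===== PORT B =====
def left_consecutive_index_py_alt (values_list : List Int) (invalid_value : Int) : List Int :=
  let n : Int := values_list.length
  let mismatchIdxs : List Int :=
    ((PySem.List.enumerate values_list 0).filter (fun p => p.2 != invalid_value)).map Prod.fst
  let k : Int := (PySem.List.min? mismatchIdxs (fun x => x)).getD n
  PySem.List.pyRange 0 k 1

-- ===== PRECONDITION & SPEC =====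
def Spec_left_consecutive_index_py (values_list : List Int) (invalid_value : Int) (out : List Int) : Prop := out = left_consecutive_index_py_alt values_list invalid_value
instance (values_list : List Int) (invalid_value : Int) (out : List Int) : Decidable (Spec_left_consecutive_index_py values_list invalid_value out) := by unfold Spec_left_consecutive_index_py; infer_instance

-- ===== CLAIM (what is proved, stated in full; the proofs are below) =====
def Claim_equal_left_consecutive_index_py : Prop := ∀ (values_list : List Int) (invalid_value : Int), Dom_left_consecutive_index_py values_list invalid_value → Spec_left_consecutive_index_py values_list invalid_value (left_consecutive_index_py values_list invalid_value)

-- ===== LEMMAS AND PROOFS =====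
theorem leftConsecGoA_eq (vs : List Int) (inv : Int) (i : Int) :
    leftConsecGoA vs inv i
      = (List.range (vs.takeWhile (fun v => v == inv)).length).map (fun j : Nat => i + (j : Int)) := by
  induction vs generalizing i with
  | nil => simp [leftConsecGoA]
  | cons v rest ih =>
    by_cases h : v == inv
    · rw [List.takeWhile_cons_of_pos (p := fun v => v == inv) (l := rest) h]
      rw [List.length_cons, List.range_succ_eq_map, List.map_cons, List.map_map]
      show leftConsecGoA (v :: rest) inv i = (i + ((0:Nat) : Int)) :: _
      rw [leftConsecGoA, if_pos h, ih]
      simp only [List.cons.injEq]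
      exact ⟨by push_cast; ring, List.map_congr_left fun j _ => by simp [Function.comp]; ring⟩
    · rw [List.takeWhile_cons_of_neg (p := fun v => v == inv) (l := rest) (by simpa using h)]
      simp [leftConsecGoA, h]

theorem foldl_min_of_le (T : List Int) (s : Int) (h : ∀ y ∈ T, s ≤ y) :
    T.foldl min s = s := by
  induction T generalizing s with
  | nil => rfl
  | cons t T ih =>
    have hs : min s t = s := min_eq_left (h t (by simp))
    simp only [List.foldl_cons, hs]
    exact ih s (fun y hy => h y (by simp [hy]))

theorem min_mismatch_eq (vs : List Int) (inv : Int) (s : Int) :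
    (PySem.List.min?
        (((PySem.List.enumerate vs s).filter (fun p => p.2 != inv)).map Prod.fst)
        (fun x => x)).getD (s + vs.length)
      = s + (vs.takeWhile (fun v => v == inv)).length := by
  induction vs generalizing s with
  | nil => simp [PySem.List.enumerate_nil, PySem.List.min?]
  | cons v rest ih =>
    rw [PySem.List.enumerate_cons]
    by_cases h : v == inv
    · rw [List.takeWhile_cons_of_pos (p := fun v => v == inv) (l := rest) h]
      simp only [List.filter_cons]
      rw [if_neg (by simpa using h)]
      have hrec := ih (s + 1)
      simp only [List.length_cons]
      push_cast
      push_cast at hrec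
      rw [show s + ((rest.length : Int) + 1) = (s + 1) + rest.length by ring, hrec]
      ring
    · rw [List.takeWhile_cons_of_neg (p := fun v => v == inv) (l := rest) (by simpa using h)]
      simp only [List.filter_cons]
      rw [if_pos (by simpa using h)]
      simp only [List.map_cons]
      rw [PySem.List.min?_id_cons]
      have hge : ∀ y ∈ (((PySem.List.enumerate rest (s + 1)).filter
          (fun p => p.2 != inv)).map Prod.fst), s ≤ y := by
        intro y hy
        obtain ⟨p, hp, rfl⟩ := List.mem_map.mp hy
        have hpm := List.mem_of_mem_filter hp
        obtain ⟨k, hk, rfl⟩ := (PySem.List.mem_enumerate_iff _ _ _).mp hpm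
        simp only
        omega
      rw [foldl_min_of_le _ s hge]
      simp

-- ===== VERDICT (by name: the statement is the Claim_ definition above) =====
theorem left_consecutive_index_py_spec : Claim_equal_left_consecutive_index_py := by
  intro vs inv _
  unfold Spec_left_consecutive_index_py left_consecutive_index_py left_consecutive_index_py_alt
  dsimp only
  have hm := min_mismatch_eq vs inv 0
  simp only [zero_add] at hm
  rw [leftConsecGoA_eq, hm, PySem.List.pyRange_one]
  simp
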